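-- pv_equiv track=rewrite | github.com/Sallyrideauto/Baekjoon | 백준/Silver/3986. 좋은 단어/좋은 단어.py | count_good_words
-- ===== SOURCE A (Python) =====
-- def count_good_words(n, words):
--     good_word_count = 0
--
--     for word in words:
--         stack = []
--
--         for char in word:
--             if stack and stack[-1] == char:
--                 # 스택이 비어 있지 않고, 스택의 맨 위와 현재 문자가 같으면
--                 stack.pop()
--             else:
--                 stack.append(char)    # 그렇지 않으면 현재 문자를 스택에 추가
--
--         if not stack:
--             # 스택이 비어 있으면 모든 문자가 짝을 구성한 것
--             good_word_count += 1
--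
--     return good_word_count
-- ===== SOURCE B (Python) =====
-- def _delete_pairs(s):
--     out = []
--     i = 0
--     while i < len(s):
--         if i + 1 < len(s) and s[i] == s[i + 1]:
--             i += 2
--         else:
--             out.append(s[i])
--             i += 1
--     return "".join(out)
--
--
-- def count_good_words(n, words):
--     good = 0
--     for word in words:
--         prev = None
--         while prev != word:
--             prev = word
--             word = _delete_pairs(word)
--         if word == "":
--             good += 1
--     return good
-- ===== Notes on version B (the rewrite author's own statement) =====
-- stated objective: alternative
-- what changed: Replaces A's single left-to-right stack pass per word by repeatedly rescanning the whole word deleting every adjacent equal pair until a fixed point, counting the word as good iff the normal form is empty (relies on confluence of adjacent-pair cancellation).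
import Mathlib
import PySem

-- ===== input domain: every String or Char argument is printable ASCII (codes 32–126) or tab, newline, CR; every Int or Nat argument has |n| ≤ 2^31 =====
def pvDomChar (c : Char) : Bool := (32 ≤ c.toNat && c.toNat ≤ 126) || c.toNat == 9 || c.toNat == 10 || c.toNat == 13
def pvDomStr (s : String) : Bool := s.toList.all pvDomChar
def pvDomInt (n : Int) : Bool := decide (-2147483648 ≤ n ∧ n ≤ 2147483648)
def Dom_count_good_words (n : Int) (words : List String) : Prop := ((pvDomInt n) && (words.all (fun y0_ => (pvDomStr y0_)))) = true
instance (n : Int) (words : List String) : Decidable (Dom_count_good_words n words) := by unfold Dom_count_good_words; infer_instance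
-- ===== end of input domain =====

-- B replaces A's one-pass stack scan by repeated whole-word deletion of adjacent equal
-- pairs to a fixed point (objective: alternative algorithm, not faster).

-- ===== PORT A =====
-- A's inner loop body: the stack is a list used at its back (append / stack[-1] / pop).
def stepA (stack : List Char) (char : Char) : List Char :=
  if stack ≠ [] ∧ stack.getLast? = some char then stack.dropLast else stack ++ [char]

def count_good_words (n : Int) (words : List String) : Int :=
  words.foldl (fun good_word_count word =>
    let stack := word.toList.foldl stepA []
    if stack = [] then good_word_count + 1 else good_word_count) 0

-- ===== PORT B =====
-- B's _delete_pairs: one left-to-right rescan removing each doubled neighbour pair.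
def onePass : List Char → List Char
  | [] => []
  | [a] => [a]
  | a :: b :: t => if a = b then onePass t else a :: onePass (b :: t)

theorem onePass_length_le : ∀ l : List Char, (onePass l).length ≤ l.length
  | [] => le_rfl
  | [_] => le_rfl
  | a :: b :: t => by
    unfold onePass
    by_cases h : a = b
    · rw [if_pos h]
      have := onePass_length_le t
      simp only [List.length_cons]
      omega
    · rw [if_neg h]
      have := onePass_length_le (b :: t)
      simp only [List.length_cons] at *
      omega

theorem onePass_eq_or_lt : ∀ l : List Char, onePass l = l ∨ (onePass l).length < l.length
  | [] => Or.inl rfl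
  | [_] => Or.inl rfl
  | a :: b :: t => by
    unfold onePass
    by_cases h : a = b
    · rw [if_pos h]
      right
      have := onePass_length_le t
      simp only [List.length_cons]
      omega
    · rw [if_neg h]
      rcases onePass_eq_or_lt (b :: t) with he | hl
      · exact Or.inl (by rw [he])
      · right
        simp only [List.length_cons] at *
        omega

-- B's while loop: keep rescanning until the word stops changing.
def reduce (word : List Char) : List Char :=
  let next := onePass word
  if next = word then word else reduce next
termination_by word.length
decreasing_by
  rcases onePass_eq_or_lt word with he | hl
  · exact absurd he (by assumption)
  · exact hl

def count_good_words_alt (n : Int) (words : List String) : Int :=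
  words.foldl (fun good word =>
    if reduce word.toList = [] then good + 1 else good) 0

-- ===== PRECONDITION & SPEC =====
def Spec_count_good_words (n : Int) (words : List String) (out : Int) : Prop := out = count_good_words_alt n words
instance (n : Int) (words : List String) (out : Int) : Decidable (Spec_count_good_words n words out) := by unfold Spec_count_good_words; infer_instance

-- ===== CLAIM (what is proved, stated in full; the proofs are below) =====
def Claim_equal_count_good_words : Prop := ∀ (n : Int) (words : List String), Dom_count_good_words n words → Spec_count_good_words n words (count_good_words n words)

-- ===== LEMMAS AND PROOFS =====

-- Cons-headed view of A's stack (the stack reversed); used only in the proofs.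
def stepC (st : List Char) (c : Char) : List Char :=
  if st.head? = some c then st.tail else c :: st

theorem stepA_bridge (s : List Char) (c : Char) : stepA s c = (stepC s.reverse c).reverse := by
  rcases List.eq_nil_or_concat s with rfl | ⟨u, d, rfl⟩
  · simp [stepA, stepC]
  · by_cases h : d = c <;>
      simp [stepA, stepC, h]

theorem foldl_bridge : ∀ (l s : List Char),
    List.foldl stepA s l = (List.foldl stepC s.reverse l).reverse
  | [], s => by simp
  | c :: t, s => by
    simp only [List.foldl_cons, stepA_bridge]
    rw [foldl_bridge t]
    simp

-- No two adjacent equal characters.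
def NoAdj : List Char → Prop
  | [] => True
  | [_] => True
  | a :: b :: t => a ≠ b ∧ NoAdj (b :: t)

theorem noAdj_tail : ∀ {a : Char} {t : List Char}, NoAdj (a :: t) → NoAdj t
  | _, [], _ => trivial
  | _, _ :: _, h => h.2

theorem noAdj_stepC {st : List Char} (c : Char) (h : NoAdj st) : NoAdj (stepC st c) := by
  cases st with
  | nil => simp [stepC, NoAdj]
  | cons d t =>
    by_cases hdc : d = c
    · simpa [stepC, hdc] using noAdj_tail h
    · have : (d :: t).head? = some c ↔ False := by simp [hdc]
      simp only [stepC, this, if_false]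
      exact ⟨fun hc => hdc hc.symm, h⟩

theorem stepC_stepC {st : List Char} (c : Char) (h : NoAdj st) :
    stepC (stepC st c) c = st := by
  cases st with
  | nil => simp [stepC]
  | cons d t =>
    by_cases hdc : d = c
    · subst hdc
      cases t with
      | nil => simp [stepC]
      | cons e t' =>
        have hde : d ≠ e := h.1
        simp [stepC, Ne.symm hde]
    · simp [stepC, hdc]

theorem pass_fold : ∀ l : List Char, ∀ st : List Char, NoAdj st →
    List.foldl stepC st (onePass l) = List.foldl stepC st l
  | [], _, _ => rfl
  | [_], _, _ => rfl
  | a :: b :: t, st, hst => by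
    unfold onePass
    by_cases h : a = b
    · subst h
      simp only [List.foldl_cons]
      rw [stepC_stepC a hst]
      exact pass_fold t st hst
    · simp only [if_neg h, List.foldl_cons]
      exact pass_fold (b :: t) (stepC st a) (noAdj_stepC a hst)

theorem noAdj_of_fix : ∀ l : List Char, onePass l = l → NoAdj l
  | [], _ => trivial
  | [_], _ => trivial
  | a :: b :: t, h => by
    unfold onePass at h
    by_cases hab : a = b
    · exfalso
      rw [if_pos hab] at h
      have := congrArg List.length h
      have hle := onePass_length_le t
      simp at this
      omega
    · rw [if_neg hab] at h
      have h2 : onePass (b :: t) = b :: t := by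
        simpa using h
      exact ⟨hab, noAdj_of_fix (b :: t) h2⟩

theorem noAdj_middle : ∀ (u : List Char) (c : Char) (v : List Char),
    ¬ NoAdj (u ++ c :: c :: v)
  | [], c, v => fun h => h.1 rfl
  | _ :: u', c, v => fun h => noAdj_middle u' c v (noAdj_tail h)

theorem foldl_id_of_noAdj : ∀ (l st : List Char), NoAdj (st.reverse ++ l) →
    List.foldl stepC st l = l.reverse ++ st
  | [], st, _ => by simp
  | c :: t, st, h => by
    have hpush : stepC st c = c :: st := by
      cases st with
      | nil => simp [stepC]
      | cons d st' =>
        by_cases hdc : d = c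
        · exfalso
          subst hdc
          exact noAdj_middle st'.reverse d t (by simpa using h)
        · simp [stepC, hdc]
    simp only [List.foldl_cons, hpush]
    rw [foldl_id_of_noAdj t (c :: st) (by simpa using h)]
    simp

theorem reduce_fix (l : List Char) : onePass (reduce l) = reduce l := by
  unfold reduce
  by_cases h : onePass l = l
  · simpa [h] using h
  · simp only [h, if_false]
    exact reduce_fix (onePass l)
termination_by l.length
decreasing_by
  rcases onePass_eq_or_lt l with he | hl
  · exact absurd he h
  · exact hl

theorem reduce_fold (l : List Char) : List.foldl stepC [] (reduce l) = List.foldl stepC [] l := by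
  unfold reduce
  by_cases h : onePass l = l
  · simp [h]
  · simp only [h, if_false]
    rw [reduce_fold (onePass l)]
    exact pass_fold l [] trivial
termination_by l.length
decreasing_by
  rcases onePass_eq_or_lt l with he | hl
  · exact absurd he h
  · exact hl

theorem stack_eq_reduce (l : List Char) : List.foldl stepA [] l = reduce l := by
  rw [foldl_bridge l []]
  show (List.foldl stepC [] l).reverse = reduce l
  rw [← reduce_fold l]
  rw [foldl_id_of_noAdj (reduce l) [] (by simpa using noAdj_of_fix (reduce l) (reduce_fix l))]
  simp

theorem counts_eq : ∀ (ws : List String) (g : Int),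
    ws.foldl (fun good_word_count word =>
      let stack := word.toList.foldl stepA []
      if stack = [] then good_word_count + 1 else good_word_count) g
    = ws.foldl (fun good word =>
      if reduce word.toList = [] then good + 1 else good) g
  | [], _ => rfl
  | w :: ws, g => by
    simp only [List.foldl_cons, stack_eq_reduce]

-- ===== VERDICT (by name: the statement is the Claim_ definition above) =====
theorem count_good_words_spec : Claim_equal_count_good_words := by
  intro n words _
  unfold Spec_count_good_words count_good_words count_good_words_alt
  exact counts_eq words 0
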